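-- pv_equiv track=rewrite | github.com/panzi/voicecoder | voicecoder/main.py | find_mark_line
-- ===== SOURCE A (Python) =====
-- def find_mark_line(mark_line: str, content: str, head_lines: int) -> int:
--     line_count = 0
--     prev = 0
--     while line_count < head_lines:
--         index = content.find('\n', prev)
--         if index < 0:
--             line = content[prev:]
--             if line == mark_line:
--                 return prev
--             return -1
--         line = content[prev:index]
--         if line == mark_line:
--             return prev
--         prev = index + 1
--         line_count += 1
--     return -1
-- ===== SOURCE B (Python) =====
-- def find_mark_line(mark_line: str, content: str, head_lines: int) -> int:
--     # Build a first-occurrence index of every line (line -> (line number, byte offset)),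
--     # then answer with a single lookup instead of a limited linear scan.
--     index = {}
--     offset = 0
--     for i, line in enumerate(content.split('\n')):
--         if line not in index:
--             index[line] = (i, offset)
--         offset += len(line) + 1
--     hit = index.get(mark_line)
--     if hit is not None and hit[0] < head_lines:
--         return hit[1]
--     return -1
-- ===== Notes on version B (the rewrite author's own statement) =====
-- stated objective: alternative
-- what changed: B replaces A's limited streaming find('\n')/slice scan by building a hash index mapping each line to its first (line number, byte offset) over all of content.split('\n'), then answers with a single dict lookup and an out-of-loop head_lines comparison.
import Mathlib
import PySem

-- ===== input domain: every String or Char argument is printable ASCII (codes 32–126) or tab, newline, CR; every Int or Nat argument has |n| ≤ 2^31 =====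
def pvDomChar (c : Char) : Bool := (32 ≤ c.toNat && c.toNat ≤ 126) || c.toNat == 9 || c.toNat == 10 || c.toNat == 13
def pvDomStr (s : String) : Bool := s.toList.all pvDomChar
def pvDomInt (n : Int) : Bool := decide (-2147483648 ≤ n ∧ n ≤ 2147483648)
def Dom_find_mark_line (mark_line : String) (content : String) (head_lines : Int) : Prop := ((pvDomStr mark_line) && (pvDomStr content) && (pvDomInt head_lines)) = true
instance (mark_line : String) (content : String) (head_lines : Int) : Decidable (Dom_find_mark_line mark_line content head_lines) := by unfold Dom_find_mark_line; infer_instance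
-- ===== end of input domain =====

-- B replaces A's limited streaming find('\n')/slice scan by building a first-occurrence
-- hash index of ALL lines (line -> (line number, offset)) and answering with one lookup;
-- objective: alternative structure, same value proved on every input.

-- ===== PORT A =====
-- A's while loop: line_count/prev state, content.find('\n', prev) each round, slices compared to mark_line.
def pvALoop (mark cs : List Char) (head_lines line_count prev : Int) : Int :=
  if _h : line_count < head_lines then
    let index := PySem.Chars.findFrom cs ['\n'] prev none
    if index < 0 then
      let line := PySem.Chars.slice cs (some prev) none
      if line = mark then prev else -1
    else
      let line := PySem.Chars.slice cs (some prev) (some index)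
      if line = mark then prev
      else pvALoop mark cs head_lines (line_count + 1) (index + 1)
  else -1
termination_by (head_lines - line_count).toNat
decreasing_by omega

def find_mark_line (mark_line : String) (content : String) (head_lines : Int) : Int :=
  pvALoop mark_line.toList content.toList head_lines 0 0

-- ===== PORT B =====
-- B's for loop over enumerate(content.split('\n')): build the first-occurrence index dict.
def pvBuild : List (List Char) → PySem.Dict (List Char) (Int × Int) → Int → Int → PySem.Dict (List Char) (Int × Int)
  | [], d, _, _ => d
  | line :: rest, d, i, off =>
    pvBuild rest (if d.contains line then d else d.insert line (i, off)) (i + 1) (off + line.length + 1)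

def find_mark_line_alt (mark_line : String) (content : String) (head_lines : Int) : Int :=
  match (pvBuild (content.toList.splitOn '\n') PySem.Dict.empty 0 0).get? mark_line.toList with
  | some hit => if hit.1 < head_lines then hit.2 else -1
  | none => -1

-- ===== PRECONDITION & SPEC =====
def Spec_find_mark_line (mark_line : String) (content : String) (head_lines : Int) (out : Int) : Prop := out = find_mark_line_alt mark_line content head_lines
instance (mark_line : String) (content : String) (head_lines : Int) (out : Int) : Decidable (Spec_find_mark_line mark_line content head_lines out) := by unfold Spec_find_mark_line; infer_instance

-- ===== CLAIM (what is proved, stated in full; the proofs are below) =====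
def Claim_equal_find_mark_line : Prop := ∀ (mark_line : String) (content : String) (head_lines : Int), Dom_find_mark_line mark_line content head_lines → Spec_find_mark_line mark_line content head_lines (find_mark_line mark_line content head_lines)

-- ===== LEMMAS AND PROOFS =====

-- proof-side intermediate: the plain limited line scan with a running offset
def pvLineLoop (mark : List Char) (head_lines : Int) : List (List Char) → Int → Int → Int
  | [], _, _ => -1
  | line :: rest, i, offset =>
    if head_lines ≤ i then -1
    else if line = mark then offset
    else pvLineLoop mark head_lines rest (i + 1) (offset + line.length + 1)

-- proof-side intermediate: first line equal to mark, with its index and offset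
def pvFirst (mark : List Char) : List (List Char) → Int → Int → Option (Int × Int)
  | [], _, _ => none
  | line :: rest, i, offset =>
    if line = mark then some (i, offset)
    else pvFirst mark rest (i + 1) (offset + line.length + 1)

lemma pv_splitOn_not_mem {c : Char} : ∀ {l : List Char}, c ∉ l → l.splitOn c = [l] := by
  intro l
  induction l with
  | nil => intro _; simp
  | cons x xs ih =>
    intro h
    simp at h
    have hx : ¬ (x == c) = true := by simp; exact fun e => h.1 e.symm
    have := ih h.2
    simp [List.splitOn, List.splitOnP_cons, hx] at *
    simp [this]

lemma pv_splitOn_append {c : Char} {t r : List Char} (h : c ∉ t) :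
    (t ++ c :: r).splitOn c = t :: r.splitOn c := by
  induction t with
  | nil => simp [List.splitOn, List.splitOnP_cons]
  | cons x xs ih =>
    simp at h
    have hx : ¬ (x == c) = true := by simp; exact fun e => h.1 e.symm
    have := ih (by simp [h.2])
    simp [List.splitOn, List.splitOnP_cons, hx] at *
    simp [this]

lemma pv_find_singleton {c : Char} {t r : List Char} (h : c ∉ t) :
    PySem.Chars.find (t ++ c :: r) [c] = (t.length : Int) := by
  set s := t ++ c :: r with hs
  have hinf : [c] <:+: s := ⟨t, r, by simp [hs]⟩
  have hnn : 0 ≤ PySem.Chars.find s [c] := (PySem.Chars.find_nonneg_iff s [c]).mpr hinf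
  obtain ⟨hpre, hmin⟩ := PySem.Chars.find_spec hnn
  have hle : (PySem.Chars.find s [c]).toNat ≤ t.length := by
    by_contra hlt
    push Not at hlt
    refine hmin t.length hlt ?_
    rw [hs, List.drop_left]
    exact ⟨r, rfl⟩
  have hge : t.length ≤ (PySem.Chars.find s [c]).toNat := by
    by_contra hlt
    push Not at hlt
    obtain ⟨u, hu⟩ := hpre
    have h1 : s[(PySem.Chars.find s [c]).toNat]? = some c := by
      have := congrArg (·[0]?) hu
      simpa [List.getElem?_drop] using this.symm
    have h2 : s[(PySem.Chars.find s [c]).toNat]? = t[(PySem.Chars.find s [c]).toNat]? := by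
      rw [hs, List.getElem?_append_left hlt]
    rw [h2] at h1
    exact h (List.mem_of_getElem? h1)
  omega

lemma pv_base (mark cs : List Char) (hl lc : Int) (rest : List Char) (prev : Nat)
    (hp : prev ≤ cs.length) (hr : rest = cs.drop prev) (hmem : '\n' ∉ rest) :
    pvALoop mark cs hl lc prev = pvLineLoop mark hl (rest.splitOn '\n') lc prev := by
  rw [pvALoop, pv_splitOn_not_mem hmem]
  by_cases hlt : lc < hl
  · have hfind : PySem.Chars.find (cs.drop prev) ['\n'] = -1 := by
      rw [PySem.Chars.find_eq_neg_one_iff]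
      intro hinf
      exact hmem (hr ▸ hinf.subset (by simp))
    simp only [PySem.Chars.findFrom_natCast cs ['\n'] prev hp, hfind, pvLineLoop]
    simp only [PySem.Chars.slice_eq_listSlice, PySem.List.slice_from_natCast, ← hr]
    have : ¬ hl ≤ lc := by omega
    simp [hlt, this]
  · have : hl ≤ lc := by omega
    simp [pvLineLoop, hlt, this]

lemma pv_loop_eq_aux (mark cs : List Char) (hl : Int) :
    ∀ (n : Nat) (rest : List Char) (prev : Nat) (lc : Int), rest.length ≤ n →
      prev ≤ cs.length → rest = cs.drop prev →
      pvALoop mark cs hl lc prev = pvLineLoop mark hl (rest.splitOn '\n') lc prev := by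
  intro n
  induction n with
  | zero =>
    intro rest prev lc hn hp hr
    have : rest = [] := by simpa using List.eq_nil_of_length_eq_zero (by omega)
    exact pv_base mark cs hl lc rest prev hp hr (by simp [this])
  | succ n ih =>
    intro rest prev lc hn hp hr
    by_cases hmem : '\n' ∈ rest
    · -- decompose rest = t ++ '\n' :: r with '\n' ∉ t
      set p : Char → Bool := (· != '\n') with hpdef
      have hd : rest.dropWhile p ≠ [] := by
        intro hnil
        have := (List.dropWhile_eq_nil_iff).mp hnil '\n' hmem
        simp [hpdef] at this
      set t := rest.takeWhile p with ht
      have hhead : ((rest.dropWhile p).head hd) = '\n' := by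
        have := List.head_dropWhile_not p hd
        simpa [hpdef] using this
      set r := (rest.dropWhile p).tail with hrr
      have hdecomp : rest = t ++ '\n' :: r := by
        conv_lhs => rw [← List.takeWhile_append_dropWhile (p := p) (l := rest)]
        congr 1
        exact (List.cons_head?_tail (by rw [Option.mem_def, List.head?_eq_some_head hd, hhead])).symm
      have hnt : '\n' ∉ t := by
        intro hmt
        have := List.mem_takeWhile_imp (ht ▸ hmt)
        simp [hpdef] at this
      by_cases hlt : lc < hl
      · -- one step on each side
        have hfind : PySem.Chars.find (cs.drop prev) ['\n'] = (t.length : Int) := by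
          rw [← hr, hdecomp]; exact pv_find_singleton hnt
        rw [pvALoop, hdecomp, pv_splitOn_append hnt]
        simp only [PySem.Chars.findFrom_natCast cs ['\n'] prev hp, hfind, pvLineLoop]
        have hnot : ¬ ((prev : Int) + t.length < 0) := by omega
        have hnot2 : ¬ (hl ≤ lc) := by omega
        have hline : PySem.Chars.slice cs (some (prev : Int)) (some ((prev : Int) + t.length)) = t := by
          simp only [PySem.Chars.slice_eq_listSlice, PySem.List.slice_natCast_add, ← hr, hdecomp]
          exact List.take_left
        have hlen : (cs.drop prev).length = cs.length - prev := by simp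
        have hrestlen : rest.length = t.length + 1 + r.length := by rw [hdecomp]; simp; omega
        have ht1 : ¬ ((t.length : Int) = -1) := by omega
        have h5 : rest.length = cs.length - prev := by rw [hr]; exact hlen
        simp only [dif_pos hlt, if_neg ht1, if_neg hnot, if_neg hnot2, hline]
        by_cases hm : t = mark
        · simp [hm]
        · simp only [if_neg hm]
          have hcast : (prev : Int) + t.length + 1 = ((prev + (t.length + 1) : Nat) : Int) := by
            push_cast; ring
          have hdropr : r = cs.drop (prev + (t.length + 1)) := by
            rw [← List.drop_drop, ← hr, hdecomp, ← List.drop_drop, List.drop_left]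
            rfl
          rw [hcast]
          exact ih r (prev + (t.length + 1)) (lc + 1) (by omega) (by omega) hdropr
      · have : hl ≤ lc := by omega
        rw [pvALoop, hdecomp, pv_splitOn_append hnt]
        simp [pvLineLoop, hlt, this]
    · exact pv_base mark cs hl lc rest prev hp hr hmem

-- pvFirst only finds indices at or after the start index
lemma pvFirst_ge (mark : List Char) :
    ∀ (lines : List (List Char)) (i off j o : Int),
      pvFirst mark lines i off = some (j, o) → i ≤ j := by
  intro lines
  induction lines with
  | nil => intro i off j o h; simp [pvFirst] at h
  | cons line rest ih =>
    intro i off j o h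
    rw [pvFirst] at h
    by_cases hm : line = mark
    · simp [hm] at h; omega
    · rw [if_neg hm] at h
      have := ih (i + 1) (off + line.length + 1) j o h
      omega

-- the limited line scan in terms of the first matching line
lemma pvLineLoop_eq_first (mark : List Char) (hl : Int) :
    ∀ (lines : List (List Char)) (i off : Int),
      pvLineLoop mark hl lines i off =
        match pvFirst mark lines i off with
        | some (j, o) => if j < hl then o else -1
        | none => -1 := by
  intro lines
  induction lines with
  | nil => intro i off; simp [pvLineLoop, pvFirst]
  | cons line rest ih =>
    intro i off
    rw [pvLineLoop, pvFirst]
    by_cases hle : hl ≤ i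
    · rw [if_pos hle]
      by_cases hm : line = mark
      · have : ¬ i < hl := by omega
        simp [hm, this]
      · rw [if_neg hm]
        cases hfe : pvFirst mark rest (i + 1) (off + line.length + 1) with
        | none => simp
        | some p =>
          obtain ⟨j, o⟩ := p
          have := pvFirst_ge mark rest (i + 1) (off + line.length + 1) j o hfe
          have : ¬ j < hl := by omega
          simp [this]
    · rw [if_neg hle]
      by_cases hm : line = mark
      · have : i < hl := by omega
        simp [hm, this]
      · rw [if_neg hm, if_neg hm]
        exact ih (i + 1) (off + line.length + 1)

-- what the dict built by B's loop answers: the caller's dict first, else the first matching line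
lemma pvBuild_get (mark : List Char) :
    ∀ (lines : List (List Char)) (d : PySem.Dict (List Char) (Int × Int)) (i off : Int),
      (pvBuild lines d i off).get? mark = (d.get? mark).or (pvFirst mark lines i off) := by
  intro lines
  induction lines with
  | nil => intro d i off; simp [pvBuild, pvFirst]
  | cons line rest ih =>
    intro d i off
    rw [pvBuild, pvFirst]
    rw [ih]
    by_cases hm : line = mark
    · subst hm
      by_cases hc : d.contains line = true
      · rw [if_pos hc]
        have hs : (d.get? line).isSome = true := by
          rw [← PySem.Dict.contains_eq_isSome_get?]; exact hc
        obtain ⟨v, hg⟩ := Option.isSome_iff_exists.mp hs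
        simp [hg]
      · rw [if_neg hc]
        have hg : d.get? line = none := by
          rw [PySem.Dict.get?_eq_none_iff_contains]
          simpa using hc
        simp [PySem.Dict.get?_insert_self, hg]
    · have hne : mark ≠ line := fun e => hm e.symm
      rw [if_neg hm]
      by_cases hc : d.contains line = true
      · rw [if_pos hc]
      · rw [if_neg hc, PySem.Dict.get?_insert_of_ne d (i, off) hne]

-- ===== VERDICT (by name: the statement is the Claim_ definition above) =====
theorem find_mark_line_spec : Claim_equal_find_mark_line := by
  intro mark_line content head_lines _
  unfold Spec_find_mark_line find_mark_line find_mark_line_alt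
  have hA : pvALoop mark_line.toList content.toList head_lines 0 0 =
      pvLineLoop mark_line.toList head_lines (content.toList.splitOn '\n') 0 0 := by
    simpa using
      pv_loop_eq_aux mark_line.toList content.toList head_lines content.toList.length
        content.toList 0 0 le_rfl (Nat.zero_le _) rfl
  rw [hA, pvLineLoop_eq_first]
  rw [pvBuild_get mark_line.toList (content.toList.splitOn '\n') PySem.Dict.empty 0 0]
  simp only [PySem.Dict.get?_empty, Option.or]
  cases pvFirst mark_line.toList (content.toList.splitOn '\n') 0 0 with
  | none => rfl
  | some p => obtain ⟨j, o⟩ := p; rfl
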